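-- pv_equiv track=rewrite | github.com/rdshinde/FDS-Assignments | ASN_A_02.py | search
-- ===== SOURCE A (Python) =====
-- def search(sentence):
--     lst = sentence.split()
--     index = 0
--     long = 0
--     while index< len(lst):
--         lenth = len(lst[index])
--         if lenth>long:
--             long = lenth
--         index+=1
--     for word in lst:
--         if len(word) == long:
--             return word
-- ===== SOURCE B (Python) =====
-- def search(sentence):
--     best = None
--     for word in sentence.split():
--         if best is None or len(word) > len(best):
--             best = word
--     return best
-- ===== Notes on version B (the rewrite author's own statement) =====
-- stated objective: simpler
-- what changed: Replaces A's two sequential passes (a while loop computing the max length, then a rescan for the first word of that length) with a single pass keeping the best word seen so far, updating only on strictly greater length so the first longest still wins and None is returned for an empty sentence.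
import Mathlib
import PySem

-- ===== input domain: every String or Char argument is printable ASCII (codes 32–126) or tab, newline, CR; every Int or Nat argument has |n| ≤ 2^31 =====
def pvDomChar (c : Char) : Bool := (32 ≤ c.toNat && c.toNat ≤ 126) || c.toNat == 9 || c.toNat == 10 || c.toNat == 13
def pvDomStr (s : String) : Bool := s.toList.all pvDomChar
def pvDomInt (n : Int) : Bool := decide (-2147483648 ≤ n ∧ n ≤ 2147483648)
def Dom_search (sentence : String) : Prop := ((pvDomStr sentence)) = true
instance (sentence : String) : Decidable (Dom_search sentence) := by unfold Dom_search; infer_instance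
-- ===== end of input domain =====

-- ===== PORT A =====
-- One-line summary: B is a single pass keeping the first strictly-longest word; same result as A's two passes.
def search (sentence : String) : Option String :=
  let lst := PySem.Str.split₀ sentence
  let long := lst.foldl (fun long word =>
    if PySem.Str.len word > long then PySem.Str.len word else long) (0 : Int)
  lst.find? (fun word => PySem.Str.len word == long)

-- ===== PORT B =====
def search_alt (sentence : String) : Option String :=
  (PySem.Str.split₀ sentence).foldl
    (fun best word =>
      match best with
      | none => some word
      | some b => if PySem.Str.len word > PySem.Str.len b then some word else some b)
    none

-- ===== PRECONDITION & SPEC =====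
def Spec_search (sentence : String) (out : Option String) : Prop := out = search_alt sentence
instance (sentence : String) (out : Option String) : Decidable (Spec_search sentence out) := by unfold Spec_search; infer_instance

-- ===== CLAIM (what is proved, stated in full; the proofs are below) =====
def Claim_equal_search : Prop := ∀ (sentence : String), Dom_search sentence → Spec_search sentence (search sentence)

-- ===== LEMMAS AND PROOFS =====

def pvMStep (a : Int) (w : String) : Int :=
  if PySem.Str.len w > a then PySem.Str.len w else a

def pvBStep (best : Option String) (w : String) : Option String :=
  match best with
  | none => some w
  | some b => if PySem.Str.len w > PySem.Str.len b then some w else some b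

lemma pvLenNonneg (w : String) : (0 : Int) ≤ PySem.Str.len w := by
  simp [PySem.Str.len]

lemma pvMStep_le (l : List String) (n : Int) : n ≤ l.foldl pvMStep n := by
  induction l generalizing n with
  | nil => simp
  | cons w t ih =>
    simp only [List.foldl_cons]
    refine le_trans ?_ (ih (pvMStep n w))
    unfold pvMStep; split <;> omega

lemma pvFoldB_eq (l : List String) (b : String) :
    l.foldl pvBStep (some b) =
      (if l.foldl pvMStep (PySem.Str.len b) = PySem.Str.len b then some b
       else l.find? (fun w => PySem.Str.len w == l.foldl pvMStep (PySem.Str.len b))) := by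
  induction l generalizing b with
  | nil => simp
  | cons w t ih =>
    simp only [List.foldl_cons]
    by_cases h : PySem.Str.len w > PySem.Str.len b
    · have hb : pvBStep (some b) w = some w := by unfold pvBStep; dsimp only; rw [if_pos h]
      have hm : pvMStep (PySem.Str.len b) w = PySem.Str.len w := by unfold pvMStep; rw [if_pos h]
      rw [hb, hm, ih w]
      have hge := pvMStep_le t (PySem.Str.len w)
      have hne : t.foldl pvMStep (PySem.Str.len w) ≠ PySem.Str.len b := by omega
      rw [if_neg hne]
      by_cases hw : t.foldl pvMStep (PySem.Str.len w) = PySem.Str.len w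
      · have hbq : (PySem.Str.len w == t.foldl pvMStep (PySem.Str.len w)) = true := by
          rw [beq_iff_eq]; omega
        simp only [List.find?, hbq, if_pos hw]
      · have hbq : (PySem.Str.len w == t.foldl pvMStep (PySem.Str.len w)) = false := by
          simp only [beq_eq_false_iff_ne]; omega
        simp only [List.find?, hbq, if_neg hw]
    · have hb : pvBStep (some b) w = some b := by unfold pvBStep; dsimp only; rw [if_neg h]
      have hm : pvMStep (PySem.Str.len b) w = PySem.Str.len b := by unfold pvMStep; rw [if_neg h]
      rw [hb, hm, ih b]
      by_cases hbmax : t.foldl pvMStep (PySem.Str.len b) = PySem.Str.len b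
      · simp only [if_pos hbmax]
      · simp only [if_neg hbmax]
        have hge := pvMStep_le t (PySem.Str.len b)
        have hwne : (PySem.Str.len w == t.foldl pvMStep (PySem.Str.len b)) = false := by
          simp only [beq_eq_false_iff_ne]; omega
        simp only [List.find?, hwne]

-- ===== VERDICT (by name: the statement is the Claim_ definition above) =====
theorem search_spec : Claim_equal_search := by
  intro sentence _
  unfold Spec_search search search_alt
  show (let lst := PySem.Str.split₀ sentence;
        lst.find? (fun w => PySem.Str.len w ==
          lst.foldl (fun long word => if PySem.Str.len word > long then PySem.Str.len word else long) 0))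
      = (PySem.Str.split₀ sentence).foldl
          (fun best word => match best with
            | none => some word
            | some b => if PySem.Str.len word > PySem.Str.len b then some word else some b) none
  cases hl : PySem.Str.split₀ sentence with
  | nil => simp
  | cons w t =>
    have hstep : (fun (long : Int) (word : String) =>
        if PySem.Str.len word > long then PySem.Str.len word else long) = pvMStep := by
      funext a v; simp [pvMStep]
    have hbstep : (fun (best : Option String) (word : String) =>
        match best with
        | none => some word
        | some b => if PySem.Str.len word > PySem.Str.len b then some word else some b) = pvBStep := by
      funext o v; cases o <;> simp [pvBStep]
    simp only [hstep, hbstep, List.foldl_cons]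
    have h0 : pvMStep 0 w = PySem.Str.len w := by
      have := pvLenNonneg w
      unfold pvMStep; split <;> omega
    have hb : pvBStep none w = some w := by simp [pvBStep]
    rw [h0, hb, pvFoldB_eq t w]
    have hge := pvMStep_le t (PySem.Str.len w)
    by_cases hw : t.foldl pvMStep (PySem.Str.len w) = PySem.Str.len w
    · have hbq : (PySem.Str.len w == t.foldl pvMStep (PySem.Str.len w)) = true := by
        rw [beq_iff_eq]; omega
      simp only [List.find?, hbq, if_pos hw]
    · have hbq : (PySem.Str.len w == t.foldl pvMStep (PySem.Str.len w)) = false := by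
        simp only [beq_eq_false_iff_ne]; omega
      simp only [List.find?, hbq, if_neg hw]
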